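-- pv_equiv track=rewrite | github.com/SonOfLilit/kleenexp | ke/numrange.py | replace_all_zero_digits_staying_smaller_than_b
-- ===== SOURCE A (Python) =====
-- def sequence_of_nines_instead_of_zeros(a):
--     replaced = a
--     nine = 9
--     while a % 10 == 0:
--         replaced += nine
--         yield replaced
--         a //= 10
--         nine *= 10
--
-- def replace_all_zero_digits_staying_smaller_than_b(a, b):
--     if a == 0:
--         return 0, a
--
--     i = 0
--     for replaced in sequence_of_nines_instead_of_zeros(a):
--         if replaced <= b:
--             a = replaced
--             i += 1
--         else:
--             break
--     return i, a
-- ===== SOURCE B (Python) =====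
-- def replace_all_zero_digits_staying_smaller_than_b(a, b):
--     if a == 0:
--         return 0, a
--     # t = number of trailing zero digits of a
--     t, x = 0, a
--     while x % 10 == 0:
--         t += 1
--         x //= 10
--     # k = largest k with 10**k <= b - a + 1 (0 if b < a)
--     d = b - a + 1
--     k, p = 0, 1
--     while p * 10 <= d:
--         k += 1
--         p *= 10
--     i = min(t, k)
--     return i, a + 10 ** i - 1
-- ===== Notes on version B (the rewrite author's own statement) =====
-- stated objective: alternative
-- what changed: A walks the trailing zeros with a generator, incrementally adding 9, 90, ... and stopping at the first replacement exceeding b; B independently counts the trailing zeros t and the floor-log10 bound k of b-a+1, then returns min(t,k) and a + 10**min(t,k) - 1 in closed form.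
import Mathlib
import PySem

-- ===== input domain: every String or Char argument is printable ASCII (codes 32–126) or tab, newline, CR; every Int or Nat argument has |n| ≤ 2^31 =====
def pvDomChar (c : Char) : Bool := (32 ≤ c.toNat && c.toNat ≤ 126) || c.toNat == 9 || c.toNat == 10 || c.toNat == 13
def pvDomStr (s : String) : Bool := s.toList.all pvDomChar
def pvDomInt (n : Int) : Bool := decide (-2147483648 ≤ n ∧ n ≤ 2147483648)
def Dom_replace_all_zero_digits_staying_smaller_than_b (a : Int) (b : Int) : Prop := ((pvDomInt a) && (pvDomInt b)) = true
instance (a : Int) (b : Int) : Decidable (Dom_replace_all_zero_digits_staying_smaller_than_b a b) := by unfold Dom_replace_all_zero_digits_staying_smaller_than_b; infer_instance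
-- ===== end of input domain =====

-- B replaces A's generator/consumer loop (incrementally adding 9, 90, …, breaking past b)
-- by counting trailing zeros and the floor-log10 of b-a+1 separately and combining them in closed form.

-- ===== PORT A =====
-- The generator and the for-loop of A are fused into one recursion over the joint state
-- (generator's a = qg, replaced, nine; consumer's i, a = acur). The Nat fuel is a totality
-- guard only: it is never exhausted (each pass strips a factor 10 off qg, and fuel starts at
-- |a|, which bounds the number of trailing zero digits of a).
def pvLoopA (b : Int) : Nat → Int → Int → Int → Int → Int → Int × Int
  | 0, _, _, _, i, acur => (i, acur)
  | fuel + 1, qg, rep, nine, i, acur =>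
    if qg % 10 = 0 then
      let r := rep + nine
      if r ≤ b then pvLoopA b fuel (PySem.Int.floordiv qg 10) r (nine * 10) (i + 1) r
      else (i, acur)
    else (i, acur)

def replace_all_zero_digits_staying_smaller_than_b (a : Int) (b : Int) : Int × Int :=
  if a = 0 then (0, a)
  else pvLoopA b a.natAbs a a 9 0 a

-- ===== PORT B =====
-- t-loop: count trailing zero digits of x (fuel |a| is a totality guard, never exhausted)
def pvLoopT : Nat → Int → Int → Int
  | 0, _, t => t
  | fuel + 1, x, t =>
    if x % 10 = 0 then pvLoopT fuel (PySem.Int.floordiv x 10) (t + 1)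
    else t

-- k-loop: largest k with 10^k ≤ d, found by growing p (fuel d.toNat is a totality guard, never exhausted)
def pvLoopK : Nat → Int → Int → Int → Int
  | 0, _, k, _ => k
  | fuel + 1, d, k, p =>
    if p * 10 ≤ d then pvLoopK fuel d (k + 1) (p * 10)
    else k

-- 10 ** i for the nonnegative Int i (exact port of Python's 10 ** i since i ≥ 0)
def pvPow10 (n : Int) : Int := 10 ^ n.toNat

def replace_all_zero_digits_staying_smaller_than_b_alt (a : Int) (b : Int) : Int × Int :=
  if a = 0 then (0, a)
  else
    let t := pvLoopT a.natAbs a 0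
    let d := b - a + 1
    let k := pvLoopK d.toNat d 0 1
    let i := min t k
    (i, a + pvPow10 i - 1)

-- ===== PRECONDITION & SPEC =====
def Spec_replace_all_zero_digits_staying_smaller_than_b (a : Int) (b : Int) (out : Int × Int) : Prop := out = replace_all_zero_digits_staying_smaller_than_b_alt a b
instance (a : Int) (b : Int) (out : Int × Int) : Decidable (Spec_replace_all_zero_digits_staying_smaller_than_b a b out) := by unfold Spec_replace_all_zero_digits_staying_smaller_than_b; infer_instance

-- ===== CLAIM (what is proved, stated in full; the proofs are below) =====
def Claim_equal_replace_all_zero_digits_staying_smaller_than_b : Prop := ∀ (a : Int) (b : Int), Dom_replace_all_zero_digits_staying_smaller_than_b a b → Spec_replace_all_zero_digits_staying_smaller_than_b a b (replace_all_zero_digits_staying_smaller_than_b a b)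

-- ===== LEMMAS AND PROOFS =====

lemma pvFloordiv10 (x w : Int) (hw : x = 10 * w) :
    PySem.Int.floordiv x 10 = w := by
  rw [PySem.Int.floordiv_eq_ediv_of_pos (by norm_num)]
  simp [hw, Int.mul_ediv_cancel_left _ (by norm_num : (10:Int) ≠ 0)]

lemma pvQuot_natAbs_lt (q w : Int) (hw : q = 10 * w) (hw0 : w ≠ 0) :
    w.natAbs < q.natAbs := by
  rw [hw]
  have : w.natAbs ≠ 0 := by simpa using hw0
  simp [Int.natAbs_mul]; omega

lemma pvLoopT_ge (f : Nat) (x t : Int) : t ≤ pvLoopT f x t := by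
  induction f generalizing x t with
  | zero => simp [pvLoopT]
  | succ f ih =>
    rw [pvLoopT]
    split
    · exact le_trans (by omega) (ih _ (t + 1))
    · exact le_refl t

lemma pvLoopT_shift (f : Nat) (x s t : Int) : pvLoopT f x (s + t) = s + pvLoopT f x t := by
  induction f generalizing x t with
  | zero => simp [pvLoopT]
  | succ f ih =>
    rw [pvLoopT, pvLoopT]
    split
    · rw [show s + t + 1 = s + (t + 1) by ring, ih]
    · rfl

lemma pvLoopK_ge (f : Nat) (d k p : Int) : k ≤ pvLoopK f d k p := by
  induction f generalizing k p with
  | zero => simp [pvLoopK]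
  | succ f ih =>
    rw [pvLoopK]
    split
    · exact le_trans (by omega) (ih (k + 1) (p * 10))
    · exact le_refl k

lemma pvLoopK_shift (f : Nat) (d s k p : Int) : pvLoopK f d (s + k) p = s + pvLoopK f d k p := by
  induction f generalizing k p with
  | zero => simp [pvLoopK]
  | succ f ih =>
    rw [pvLoopK, pvLoopK]
    split
    · rw [show s + k + 1 = s + (k + 1) by ring, ih]
    · rfl

lemma pvPow10_succ (m : Int) (hm : 0 ≤ m) : pvPow10 (1 + m) = 10 * pvPow10 m := by
  unfold pvPow10
  rw [show (1 + m).toNat = m.toNat + 1 by omega, pow_succ]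
  ring

lemma pvLoopA_eq (fA : Nat) :
    ∀ (q : Int), q.natAbs ≤ fA → q ≠ 0 → ∀ (fT fK : Nat) (b A p i : Int), q.natAbs ≤ fT →
      0 < p → b - A + 1 ≤ p * 10 ^ fK →
    pvLoopA b fA q (A + p - 1) (9 * p) i (A + p - 1)
      = (i + min (pvLoopT fT q 0) (pvLoopK fK (b - A + 1) 0 p),
         A + p * pvPow10 (min (pvLoopT fT q 0) (pvLoopK fK (b - A + 1) 0 p)) - 1) := by
  induction fA with
  | zero =>
    intro q hqf hq
    exact absurd (by omega : q.natAbs = 0) (by simpa using hq)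
  | succ fA ih =>
    intro q hqf hq fT fK b A p i hqT hp hKsuf
    rw [pvLoopA]
    by_cases h : q % 10 = 0
    · obtain ⟨w, hw⟩ := Int.dvd_of_emod_eq_zero h
      have hw0 : w ≠ 0 := by rintro rfl; simp at hw; exact hq hw
      have hlt : w.natAbs < q.natAbs := pvQuot_natAbs_lt q w hw hw0
      obtain ⟨fT', rfl⟩ : ∃ fT', fT = fT' + 1 := ⟨fT - 1, by omega⟩
      have hT : pvLoopT (fT' + 1) q 0 = 1 + pvLoopT fT' w 0 := by
        rw [pvLoopT]
        simp only [h, if_pos, pvFloordiv10 q w hw]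
        rw [show (0 : Int) + 1 = 1 + 0 by ring, pvLoopT_shift]
      simp only [if_pos h, pvFloordiv10 q w hw]
      by_cases hr : A + p - 1 + 9 * p ≤ b
      · -- generator step taken; the k-loop also has fuel left (p·10 ≤ d ≤ p·10^fK forces fK ≥ 1)
        obtain ⟨fK', rfl⟩ : ∃ fK', fK = fK' + 1 := by
          refine ⟨fK - 1, ?_⟩
          rcases Nat.eq_zero_or_pos fK with h0 | h0
          · exfalso; rw [h0] at hKsuf; simp at hKsuf; omega
          · omega
        have hK : pvLoopK (fK' + 1) (b - A + 1) 0 p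
            = 1 + pvLoopK fK' (b - A + 1) 0 (p * 10) := by
          rw [pvLoopK]
          simp only [if_pos (by omega : p * 10 ≤ b - A + 1)]
          rw [show (0 : Int) + 1 = 1 + 0 by ring, pvLoopK_shift]
        have e1 : A + p - 1 + 9 * p = A + p * 10 - 1 := by ring
        have e2 : 9 * p * 10 = 9 * (p * 10) := by ring
        have hKsuf' : b - A + 1 ≤ p * 10 * 10 ^ fK' := by
          calc b - A + 1 ≤ p * (10 ^ fK' * 10) := by rw [← pow_succ]; exact hKsuf
            _ = p * 10 * 10 ^ fK' := by ring
        have step := ih w (by omega) hw0 fT' fK' b A (p * 10) (i + 1) (by omega)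
          (by positivity) hKsuf'
        have hT' : 0 ≤ pvLoopT fT' w 0 := pvLoopT_ge fT' w 0
        have hK' : 0 ≤ pvLoopK fK' (b - A + 1) 0 (p * 10) := pvLoopK_ge fK' _ 0 _
        have hmin : min (1 + pvLoopT fT' w 0) (1 + pvLoopK fK' (b - A + 1) 0 (p * 10))
            = 1 + min (pvLoopT fT' w 0) (pvLoopK fK' (b - A + 1) 0 (p * 10)) := by omega
        simp only [e1, e2]
        rw [if_pos (show A + p * 10 - 1 ≤ b by omega), step, hT, hK, hmin,
          pvPow10_succ _ (by omega)]
        refine Prod.ext ?_ ?_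
        · simp only; ring
        · simp only; ring
      · -- replaced > b: break
        have hK : pvLoopK fK (b - A + 1) 0 p = 0 := by
          cases fK with
          | zero => rfl
          | succ fK' => rw [pvLoopK, if_neg (by omega : ¬ p * 10 ≤ b - A + 1)]
        have hT' : 0 ≤ pvLoopT fT' w 0 := pvLoopT_ge fT' w 0
        rw [if_neg hr, hK, hT]
        rw [show min (1 + pvLoopT fT' w 0) 0 = 0 by omega]
        simp [pvPow10]
    · -- no trailing zero: q % 10 ≠ 0
      have hT : pvLoopT fT q 0 = 0 := by
        cases fT with
        | zero => rfl
        | succ fT' => rw [pvLoopT, if_neg h]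
      have hK' : 0 ≤ pvLoopK fK (b - A + 1) 0 p := pvLoopK_ge fK _ 0 _
      rw [if_neg h, hT]
      rw [show min (0 : Int) (pvLoopK fK (b - A + 1) 0 p) = 0 by omega]
      simp [pvPow10]

lemma pvKsuf (d : Int) : d ≤ 1 * 10 ^ d.toNat := by
  have h2 : (d.toNat : Int) < 2 ^ d.toNat := by exact_mod_cast Nat.lt_two_pow_self
  have h10 : (2 : Int) ^ d.toNat ≤ 10 ^ d.toNat := by
    exact_mod_cast Nat.pow_le_pow_left (by norm_num : 2 ≤ 10) d.toNat
  rw [one_mul]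
  omega

-- ===== VERDICT (by name: the statement is the Claim_ definition above) =====
theorem replace_all_zero_digits_staying_smaller_than_b_spec : Claim_equal_replace_all_zero_digits_staying_smaller_than_b := by
  intro a b _
  unfold Spec_replace_all_zero_digits_staying_smaller_than_b
  unfold replace_all_zero_digits_staying_smaller_than_b replace_all_zero_digits_staying_smaller_than_b_alt
  by_cases ha : a = 0
  · simp [ha]
  · simp only [ha]
    have := pvLoopA_eq a.natAbs a le_rfl ha a.natAbs (b - a + 1).toNat b a 1 0 le_rfl
      (by norm_num) (by simpa using pvKsuf (b - a + 1))
    simpa using this
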